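-- pv_equiv track=rewrite | github.com/su-hwani/logical_circuit_RD_CD | EPI.py | pi_to_min
-- ===== SOURCE A (Python) =====
-- def pi_to_min(col_pi):
--     answer = []
--     for q in col_pi:
--         pra = []
--         pra.append(q)
--         for i in range(0,q.count('2')):
--             pra1 = []
--             for k in range(0,len(pra)):
--                 pra1.append(pra[k].replace('2','1',1))
--                 pra1.append(pra[k].replace('2','0',1))
--             pra = []
--             pra.extend(pra1)
--         answer.append(pra)
--     for i in range(0,len(answer)):
--         for k in range(0,len(answer[i])):
--             answer[i][k] = '0b'+answer[i][k]
--             answer[i][k] = int(answer[i][k],2)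
--     return answer
-- ===== SOURCE B (Python) =====
-- def pi_to_min(col_pi):
--     # Single left-to-right pass per pattern: extend every partial expansion by
--     # the next character ('2' branches into '1' then '0'), then parse each
--     # completed binary string.  Leftmost '2' varies slowest, as in the original.
--     result = []
--     for q in col_pi:
--         exps = ['']
--         for c in q:
--             branches = ('1', '0') if c == '2' else (c,)
--             exps = [e + d for e in exps for d in branches]
--         result.append([int(e, 2) for e in exps])
--     return result
-- ===== Notes on version B (the rewrite author's own statement) =====
-- stated objective: simpler
-- what changed: replaces the count('2') rounds of replace-first doubling passes plus '0b'-prefixed int conversion by a single left-to-right pass that extends every partial expansion one character at a time ('2' branching into '1'/'0') and parses each plain binary string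
-- outside the precondition, e.g. on pi_to_min(['_10']): A returns [[2]], B raises ValueError; on pi_to_min(['1_0']): A returns [[2]], B returns [[2]]
import Mathlib
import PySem

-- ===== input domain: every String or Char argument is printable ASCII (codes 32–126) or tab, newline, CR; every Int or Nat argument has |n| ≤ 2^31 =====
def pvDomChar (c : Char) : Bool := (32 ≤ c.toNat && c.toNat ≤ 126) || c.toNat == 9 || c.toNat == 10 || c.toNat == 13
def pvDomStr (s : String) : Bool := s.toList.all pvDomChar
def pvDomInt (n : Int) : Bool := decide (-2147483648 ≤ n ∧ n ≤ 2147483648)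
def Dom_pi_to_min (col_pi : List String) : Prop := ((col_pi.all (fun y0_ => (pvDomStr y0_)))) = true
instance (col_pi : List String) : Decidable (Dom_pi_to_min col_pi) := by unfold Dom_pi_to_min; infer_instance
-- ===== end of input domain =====

-- B replaces A's count('2') rounds of replace-first doubling (and the '0b'+s int
-- conversion) by one left-to-right pass extending all partial expansions; same
-- return value on every input admitted by Pre_ below.

-- ===== PORT A =====

-- q.replace('2', b, 1): replace the first '2' (count=1 replace of a single char
-- is not a PySem primitive; hand-ported, exact for a one-character needle).
def rep1 (b : Char) : List Char → List Char
  | [] => []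
  | c :: cs => if c = '2' then b :: cs else c :: rep1 b cs

-- inner `for k in range(0,len(pra))` loop building pra1
def expandOnce (pra : List (List Char)) : List (List Char) :=
  pra.foldl (fun pra1 u => pra1 ++ [rep1 '1' u, rep1 '0' u]) []

-- `for i in range(0, q.count('2'))` loop
def expandIter : Nat → List (List Char) → List (List Char)
  | 0, pra => pra
  | Nat.succ n, pra => expandIter n (expandOnce pra)

-- int('0b'+s, 2): ofCharsBase? is none exactly where Python raises ValueError;
-- those inputs are excluded by Pre_, so the .getD 0 default is never reached there.
def pi_to_min (col_pi : List String) : List (List Int) :=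
  (col_pi.foldl (fun answer q => answer ++ [expandIter (PySem.Str.count q "2") [q.toList]]) []).map
    (fun row => row.map (fun s => (PySem.Int.ofCharsBase? ('0' :: 'b' :: s) 2).getD 0))

-- ===== PORT B =====

-- ('1', '0') if c == '2' else (c,)
def branches (c : Char) : List Char := if c = '2' then ['1', '0'] else [c]

-- int(e, 2) ported like A's conversion: none = ValueError, outside Pre_.
def pi_to_min_alt (col_pi : List String) : List (List Int) :=
  col_pi.map (fun q =>
    (q.toList.foldl (fun exps c => exps.flatMap (fun e => (branches c).map (fun d => e ++ [d])))
        [([] : List Char)]).map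
      (fun e => (PySem.Int.ofCharsBase? e 2).getD 0))

-- ===== PRECONDITION & SPEC =====

-- Pre_ admits the natural domain: nonempty patterns over '0','1','2'. Outside it A
-- raises ValueError, except where Python's int underscore/whitespace tolerance behind
-- the '0b' prefix accidentally accepts a string (e.g. '_10'): that acceptance is an
-- artifact of A's prefixing, and B may raise there.
def Pre_pi_to_min (col_pi : List String) : Prop :=
  (col_pi.all (fun q => !q.toList.isEmpty &&
      q.toList.all (fun c => c = '0' || c = '1' || c = '2'))) = true
instance (col_pi : List String) : Decidable (Pre_pi_to_min col_pi) := by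
  unfold Pre_pi_to_min; infer_instance

def pvWitness_pi_to_min : List String := (["102", "2"])

def Spec_pi_to_min (col_pi : List String) (out : List (List Int)) : Prop := out = pi_to_min_alt col_pi
instance (col_pi : List String) (out : List (List Int)) : Decidable (Spec_pi_to_min col_pi out) := by
  unfold Spec_pi_to_min; infer_instance

-- ===== CLAIM (what is proved, stated in full; the proofs are below) =====
def Claim_equal_pi_to_min : Prop := ∀ (col_pi : List String), Dom_pi_to_min col_pi → Pre_pi_to_min col_pi → Spec_pi_to_min col_pi (pi_to_min col_pi)

-- ===== LEMMAS AND PROOFS =====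

-- the common expansion tree: all completions of a pattern, leftmost '2' slowest
def Evar : List Char → List (List Char)
  | [] => [[]]
  | c :: cs => (branches c).flatMap (fun d => (Evar cs).map (d :: ·))

theorem dw_nonspace (l : List Char) (h : ∀ c ∈ l, PySem.Int.isIntSpace c = false) :
    List.dropWhile PySem.Int.isIntSpace l = l := by
  cases l with
  | nil => rfl
  | cons c rest => simp [h c (by simp)]

theorem ns01 (x : Char) (h : x = '0' ∨ x = '1') : PySem.Int.isIntSpace x = false := by
  rcases h with h | h <;> subst h <;> decide

-- int('0b'+t, 2) = int(t, 2) for a nonempty binary-digit string t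
theorem parse_prefix (t : List Char) (hne : t ≠ []) (h : ∀ c ∈ t, c = '0' ∨ c = '1') :
    PySem.Int.ofCharsBase? ('0' :: 'b' :: t) 2 = PySem.Int.ofCharsBase? t 2 := by
  cases t with
  | nil => exact absurd rfl hne
  | cons c rest =>
    cases rest with
    | nil => rcases h c (by simp) with h1 | h1 <;> subst h1 <;> decide
    | cons c2 rest2 =>
      have hns : ∀ x ∈ '0' :: 'b' :: c :: c2 :: rest2, PySem.Int.isIntSpace x = false := by
        intro x hx
        simp only [List.mem_cons] at hx
        rcases hx with h1 | h1 | h1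
        · subst h1; decide
        · subst h1; decide
        · exact ns01 x (h x (by simpa using h1))
      have e1 : List.dropWhile PySem.Int.isIntSpace ('0' :: 'b' :: c :: c2 :: rest2) = '0' :: 'b' :: c :: c2 :: rest2 :=
        dw_nonspace _ hns
      have e2 : List.dropWhile PySem.Int.isIntSpace (('0' :: 'b' :: c :: c2 :: rest2).reverse) = ('0' :: 'b' :: c :: c2 :: rest2).reverse :=
        dw_nonspace _ (fun x hx => hns x (List.mem_reverse.mp hx))
      have e3 : List.dropWhile PySem.Int.isIntSpace (c :: c2 :: rest2) = c :: c2 :: rest2 :=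
        dw_nonspace _ (fun x hx => ns01 x (h x hx))
      have e4 : List.dropWhile PySem.Int.isIntSpace ((c :: c2 :: rest2).reverse) = (c :: c2 :: rest2).reverse :=
        dw_nonspace _ (fun x hx => ns01 x (h x (List.mem_reverse.mp hx)))
      rcases h c (by simp) with h1 | h1 <;>
        rcases h c2 (by simp) with h2 | h2 <;> subst h1 <;> subst h2 <;>
        · simp only [PySem.Int.ofCharsBase?, e1, e2, e3, e4, List.reverse_reverse]
          simp

theorem count_go (s : List Char) : ∀ (fuel acc : Nat), s.length ≤ fuel →
    PySem.Chars.count.go ['2'] fuel s acc = acc + s.countP (fun c => c == '2') := by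
  induction s with
  | nil =>
    intro fuel acc _
    cases fuel <;> simp [PySem.Chars.count.go]
  | cons c cs ih =>
    intro fuel acc hf
    cases fuel with
    | zero => simp at hf
    | succ f =>
      have hf' : cs.length ≤ f := by simpa using hf
      by_cases hc : c = '2'
      · subst hc
        simp only [PySem.Chars.count.go]
        rw [if_pos (by simp [List.isPrefixOf])]
        simp only [List.length_cons, List.length_nil, List.drop_succ_cons, List.drop_zero]
        rw [ih f (acc + 1) hf']
        simp only [List.countP_cons]
        norm_num
        omega
      · have hc' : (c == '2') = false := by simpa using hc
        simp only [PySem.Chars.count.go]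
        rw [if_neg (by simp [List.isPrefixOf]; intro h; exact hc h.symm)]
        rw [ih f acc hf']
        simp [hc']

theorem strcount (q : String) : PySem.Str.count q "2" = q.toList.countP (fun c => c == '2') := by
  have h2 : ("2" : String).toList = ['2'] := rfl
  unfold PySem.Str.count PySem.Chars.count
  rw [h2]
  rw [if_neg (by simp)]
  rw [count_go q.toList q.toList.length 0 le_rfl]
  omega

theorem evar_of_no2 (u : List Char) (h : u.countP (fun c => c == '2') = 0) : Evar u = [u] := by
  induction u with
  | nil => rfl
  | cons c cs ih =>
    by_cases hc : c = '2'
    · subst hc; simp at h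
    · have hc' : (c == '2') = false := by simpa using hc
      rw [List.countP_cons, hc'] at h
      simp only [if_neg Bool.false_ne_true, Nat.add_zero] at h
      simp [Evar, branches, hc, ih h]

theorem rep1_count (u : List Char) (b : Char) (hb : b ≠ '2')
    (h : 0 < u.countP (fun c => c == '2')) :
    (rep1 b u).countP (fun c => c == '2') + 1 = u.countP (fun c => c == '2') := by
  induction u with
  | nil => simp at h
  | cons c cs ih =>
    by_cases hc : c = '2'
    · subst hc
      have hb' : (b == '2') = false := by simpa using hb
      simp [rep1, hb']
    · have hc' : (c == '2') = false := by simpa using hc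
      rw [List.countP_cons, hc'] at h
      simp only [if_neg Bool.false_ne_true, Nat.add_zero] at h
      simp only [rep1, if_neg hc, List.countP_cons, hc', if_neg Bool.false_ne_true, Nat.add_zero]
      exact ih h

theorem evar_split (u : List Char) (h : 0 < u.countP (fun c => c == '2')) :
    Evar u = Evar (rep1 '1' u) ++ Evar (rep1 '0' u) := by
  induction u with
  | nil => simp at h
  | cons c cs ih =>
    by_cases hc : c = '2'
    · subst hc
      simp [Evar, rep1, branches]
    · have hc' : (c == '2') = false := by simpa using hc
      rw [List.countP_cons, hc'] at h
      simp only [if_neg Bool.false_ne_true, Nat.add_zero] at h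
      simp only [Evar, rep1, if_neg hc, branches, ih h, List.flatMap_cons,
        List.flatMap_nil, List.append_nil, List.map_append]

theorem expandOnce_flatMap (pra : List (List Char)) :
    expandOnce pra = pra.flatMap (fun u => [rep1 '1' u, rep1 '0' u]) := by
  unfold expandOnce
  rw [PySem.List.foldl_append_eq_flatMap]
  rfl

theorem expandIter_spec : ∀ (n : Nat) (pra : List (List Char)),
    (∀ u ∈ pra, u.countP (fun c => c == '2') = n) →
    expandIter n pra = pra.flatMap Evar := by
  intro n
  induction n with
  | zero =>
    intro pra h
    have hid : pra.flatMap Evar = pra := by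
      induction pra with
      | nil => rfl
      | cons u rest ihp =>
        rw [List.flatMap_cons, evar_of_no2 u (h u (by simp)),
          ihp (fun v hv => h v (by simp [hv])), List.singleton_append]
    simp only [expandIter]
    exact hid.symm
  | succ n ihn =>
    intro pra h
    have hcnt : ∀ u' ∈ expandOnce pra, u'.countP (fun c => c == '2') = n := by
      rw [expandOnce_flatMap]
      intro u' hu'
      rw [List.mem_flatMap] at hu'
      obtain ⟨u, hu, hmem⟩ := hu'
      have hpos : 0 < u.countP (fun c => c == '2') := by rw [h u hu]; omega
      simp only [List.mem_cons, List.not_mem_nil, or_false] at hmem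
      rcases hmem with rfl | rfl
      · have := rep1_count u '1' (by decide) hpos
        rw [h u hu] at this; omega
      · have := rep1_count u '0' (by decide) hpos
        rw [h u hu] at this; omega
    show expandIter n (expandOnce pra) = pra.flatMap Evar
    rw [ihn _ hcnt, expandOnce_flatMap, List.flatMap_assoc]
    apply List.flatMap_congr
    intro u hu
    have hpos : 0 < u.countP (fun c => c == '2') := by rw [h u hu]; omega
    rw [List.flatMap_cons, List.flatMap_cons, List.flatMap_nil, List.append_nil]
    exact (evar_split u hpos).symm

-- every completion is a nonempty binary string
theorem evar_mem (s : List Char) (hs : ∀ c ∈ s, c = '0' ∨ c = '1' ∨ c = '2') :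
    ∀ t ∈ Evar s, (∀ c ∈ t, c = '0' ∨ c = '1') ∧ t.length = s.length := by
  induction s with
  | nil =>
    intro t ht
    rw [show Evar [] = [[]] from rfl, List.mem_singleton] at ht
    subst ht; simp
  | cons c cs ih =>
    intro t ht
    simp only [Evar, List.mem_flatMap, List.mem_map] at ht
    obtain ⟨d, hd, t', ht', rfl⟩ := ht
    have ihs := ih (fun x hx => hs x (by simp [hx])) t' ht'
    have hd01 : d = '0' ∨ d = '1' := by
      rcases hs c (by simp) with h1 | h1 | h1 <;>
        simp [branches, h1] at hd <;> tauto
    constructor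
    · intro x hx
      rcases List.mem_cons.mp hx with rfl | hx
      · exact hd01
      · exact ihs.1 x hx
    · simp [ihs.2]

theorem foldB (s : List Char) : ∀ (acc : List (List Char)),
    s.foldl (fun exps c => exps.flatMap (fun e => (branches c).map (fun d => e ++ [d]))) acc
      = acc.flatMap (fun e => (Evar s).map (e ++ ·)) := by
  induction s with
  | nil =>
    intro acc
    rw [show Evar [] = [[]] from rfl]
    simp
  | cons c cs ih =>
    intro acc
    rw [List.foldl_cons, ih, List.flatMap_assoc]
    apply List.flatMap_congr
    intro e _
    rw [List.flatMap_map]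
    simp only [Evar]
    rw [List.map_flatMap]
    apply List.flatMap_congr
    intro d _
    rw [List.map_map]
    apply List.map_congr_left
    intro t _
    simp

theorem pi_to_min_row (q : String) (hne : q.toList ≠ [])
    (hq : ∀ c ∈ q.toList, c = '0' ∨ c = '1' ∨ c = '2') :
    (expandIter (PySem.Str.count q "2") [q.toList]).map
        (fun s => (PySem.Int.ofCharsBase? ('0' :: 'b' :: s) 2).getD 0)
      = ((q.toList.foldl (fun exps c => exps.flatMap (fun e => (branches c).map (fun d => e ++ [d])))
          [([] : List Char)]).map (fun e => (PySem.Int.ofCharsBase? e 2).getD 0)) := by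
  rw [strcount, expandIter_spec _ [q.toList] (by simp), foldB]
  simp only [List.flatMap_cons, List.flatMap_nil, List.append_nil]
  have hmap : (Evar q.toList).map (fun e => ([] : List Char) ++ e) = Evar q.toList := by simp
  rw [hmap]
  apply List.map_congr_left
  intro t ht
  have hmem := evar_mem q.toList hq t ht
  have htne : t ≠ [] := by
    intro hnil
    rw [hnil] at hmem
    exact hne (List.eq_nil_of_length_eq_zero hmem.2.symm)
  rw [parse_prefix t htne hmem.1]

-- ===== VERDICT (by name: the statement is the Claim_ definition above) =====
theorem pi_to_min_spec : Claim_equal_pi_to_min := by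
  intro col_pi _ hpre
  unfold Spec_pi_to_min
  unfold pi_to_min pi_to_min_alt
  rw [PySem.List.foldl_append_singleton_eq_map]
  simp only [List.nil_append, List.map_map]
  apply List.map_congr_left
  intro q hq
  unfold Pre_pi_to_min at hpre
  rw [List.all_eq_true] at hpre
  have h := hpre q hq
  simp only [Bool.and_eq_true, List.all_eq_true] at h
  have hne : q.toList ≠ [] := by
    intro hnil; simp [hnil] at h
  have hchars : ∀ c ∈ q.toList, c = '0' ∨ c = '1' ∨ c = '2' := by
    intro c hc
    have := h.2 c hc
    simp only [Bool.or_eq_true, decide_eq_true_eq] at this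
    tauto
  exact pi_to_min_row q hne hchars
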